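-- pv_equiv track=rewrite | github.com/Sakshi-230/hackathon-synchronize | backend-2.py | combo_check
-- ===== SOURCE A (Python) =====
-- titles = [
--     "The Hindu", "Indian Express", "Times of India",
--     "Samachar", "Hindustan Times", "Dainik Bhaskar", "Morning Herald"
-- ]
--
-- periodic = ["daily","weekly","monthly","yearly"]
--
-- def combo_check(t):
--     tl = t.lower()
--     for w in tl.split():
--         if w in periodic:
--             for e in titles:
--                 if e.lower() in tl:
--                     return False, f"Rejected: periodicity on '{e}'."
--     matched = [e for e in titles if e.lower() in tl]
--     if matched:
--         return False, f"Rejected: combination of {matched}."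
--     return True, "Unique!"
-- ===== SOURCE B (Python) =====
-- titles = [
--     "The Hindu", "Indian Express", "Times of India",
--     "Samachar", "Hindustan Times", "Dainik Bhaskar", "Morning Herald"
-- ]
--
-- periodic = ["daily","weekly","monthly","yearly"]
--
-- def combo_check(t):
--     # Text-position-driven multi-pattern scan: walk the text once over all start
--     # positions, testing every lowered title pattern at each position, instead of
--     # running a separate substring search per title.
--     tl = t.lower()
--     pats = [(e.lower(), e) for e in titles]
--     found = set()
--     for i in range(len(tl) + 1):
--         for el, e in pats:
--             if tl.startswith(el, i):
--                 found.add(e)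
--     matched = [e for e in titles if e in found]
--     if not matched:
--         return True, "Unique!"
--     if any(w in periodic for w in tl.split()):
--         return False, f"Rejected: periodicity on '{matched[0]}'."
--     return False, f"Rejected: combination of {matched}."
-- ===== Notes on version B (the rewrite author's own statement) =====
-- stated objective: alternative
-- what changed: Replaces A's per-title substring searches driven by a word-loop with early returns by a text-position-driven multi-pattern scan: one sweep over every start position of the text testing all lowered title patterns at each position into a found-set, then flat classification guards on the precomputed matches.
import Mathlib
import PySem

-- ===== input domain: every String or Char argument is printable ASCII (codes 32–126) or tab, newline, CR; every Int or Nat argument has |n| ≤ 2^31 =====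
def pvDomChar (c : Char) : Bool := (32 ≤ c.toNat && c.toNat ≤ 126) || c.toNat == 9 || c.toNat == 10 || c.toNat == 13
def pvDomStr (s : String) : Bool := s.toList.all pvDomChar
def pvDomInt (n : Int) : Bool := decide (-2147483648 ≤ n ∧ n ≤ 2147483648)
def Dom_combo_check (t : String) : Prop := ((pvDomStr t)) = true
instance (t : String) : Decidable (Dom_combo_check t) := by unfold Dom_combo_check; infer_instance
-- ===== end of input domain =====

-- B replaces A's per-title substring searches (repeated under a word-loop with early
-- returns) by a single position sweep over the text matching all title patterns at
-- once, then flat classification guards; same return value everywhere (alternative).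

-- module constants shared by both Pythons
def pvTitles : List String :=
  ["The Hindu", "Indian Express", "Times of India",
   "Samachar", "Hindustan Times", "Dainik Bhaskar", "Morning Herald"]

def pvPeriodic : List String := ["daily", "weekly", "monthly", "yearly"]

-- f"Rejected: combination of {matched}." — Python's repr of a list of quote-free strings
def pvReprList (xs : List String) : String :=
  "[" ++ PySem.Str.join ", " (xs.map (fun s => "'" ++ s ++ "'")) ++ "]"

-- ===== PORT A =====
-- inner loop: for e in titles: if e.lower() in tl: return False, …
def pvInnerA (tl : String) : List String → Option (Bool × String)
  | [] => none
  | e :: rest =>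
    if PySem.Str.isIn (PySem.Str.lower e) tl then
      some (false, "Rejected: periodicity on '" ++ e ++ "'.")
    else pvInnerA tl rest

-- outer loop: for w in tl.split(): if w in periodic: <inner loop>
def pvOuterA (tl : String) : List String → Option (Bool × String)
  | [] => none
  | w :: ws =>
    if w ∈ pvPeriodic then
      match pvInnerA tl pvTitles with
      | some r => some r
      | none => pvOuterA tl ws
    else pvOuterA tl ws

def combo_check (t : String) : Bool × String :=
  let tl := PySem.Str.lower t
  match pvOuterA tl (PySem.Str.split₀ tl) with
  | some r => r
  | none =>
    let matched := pvTitles.filter (fun e => PySem.Str.isIn (PySem.Str.lower e) tl)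
    if matched ≠ [] then (false, "Rejected: combination of " ++ pvReprList matched ++ ".")
    else (true, "Unique!")

-- ===== PORT B =====
-- tl.startswith(el, i) with 0 ≤ i is exactly Chars.startswith on (tl.toList.drop i)
def combo_check_alt (t : String) : Bool × String :=
  let tl := PySem.Str.lower t
  let pats := pvTitles.map (fun e => (PySem.Str.lower e, e))
  let found : PySem.Set String :=
    (PySem.List.pyRange 0 ((tl.toList.length : Int) + 1) 1).foldl
      (fun s i => pats.foldl
        (fun s p =>
          if PySem.Chars.startswith (tl.toList.drop i.toNat) p.1.toList
          then PySem.Set.add s p.2 else s) s)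
      PySem.Set.empty
  let matched := pvTitles.filter (fun e => PySem.Set.contains found e)
  match matched with
  | [] => (true, "Unique!")
  | e0 :: _ =>
    if (PySem.Str.split₀ tl).any (fun w => decide (w ∈ pvPeriodic)) then
      (false, "Rejected: periodicity on '" ++ e0 ++ "'.")
    else (false, "Rejected: combination of " ++ pvReprList matched ++ ".")

-- ===== PRECONDITION & SPEC =====
def Spec_combo_check (t : String) (out : Bool × String) : Prop := out = combo_check_alt t
instance (t : String) (out : Bool × String) : Decidable (Spec_combo_check t out) := by unfold Spec_combo_check; infer_instance

-- ===== CLAIM (what is proved, stated in full; the proofs are below) =====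
def Claim_equal_combo_check : Prop := ∀ (t : String), Dom_combo_check t → Spec_combo_check t (combo_check t)

-- ===== LEMMAS AND PROOFS =====

-- A's inner title scan returns the first matched title's message
theorem pvInnerA_eq (tl : String) (ts : List String) :
    pvInnerA tl ts =
      (ts.filter (fun e => PySem.Str.isIn (PySem.Str.lower e) tl)).head?.map
        (fun e => (false, "Rejected: periodicity on '" ++ e ++ "'.")) := by
  induction ts with
  | nil => rfl
  | cons e rest ih =>
    rw [pvInnerA, List.filter_cons]
    by_cases h : PySem.Str.isIn (PySem.Str.lower e) tl = true
    · rw [if_pos h, if_pos h]; rfl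
    · rw [if_neg h, if_neg h, ih]

-- A's outer loop: the inner scan does not depend on the triggering word,
-- so the outer loop returns the inner scan's result iff some word is periodic
theorem pvOuterA_eq (tl : String) (ws : List String) :
    pvOuterA tl ws =
      if ws.any (fun w => decide (w ∈ pvPeriodic)) then pvInnerA tl pvTitles else none := by
  induction ws with
  | nil => rfl
  | cons w ws ih =>
    simp only [pvOuterA, List.any_cons]
    by_cases h : w ∈ pvPeriodic
    · simp only [h, decide_true, Bool.true_or, if_true]
      cases hi : pvInnerA tl pvTitles with
      | some r => rfl
      | none => simpa [hi] using ih
    · simpa [h] using ih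

-- membership in B's inner fold (add the payloads of hits at one position)
theorem pv_mem_foldl_addIf {α β : Type} [BEq α] [LawfulBEq α]
    (l : List β) (q : β → Bool) (f : β → α) (acc : PySem.Set α) (x : α) :
    (x ∈ l.foldl (fun s b => if q b then PySem.Set.add s (f b) else s) acc) ↔
      x ∈ acc ∨ ∃ b ∈ l, q b = true ∧ x = f b := by
  induction l generalizing acc with
  | nil => simp
  | cons b l ih =>
    simp only [List.foldl_cons]
    by_cases h : q b = true
    · rw [if_pos h, ih, PySem.Set.mem_add]
      constructor
      · rintro (⟨hx | hx⟩ | ⟨c, hc, hq, hx⟩)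
        · exact Or.inl hx
        · exact Or.inr ⟨b, List.mem_cons_self .., h, hx⟩
        · exact Or.inr ⟨c, List.mem_cons_of_mem _ hc, hq, hx⟩
      · rintro (hx | ⟨c, hc, hq, hx⟩)
        · exact Or.inl (Or.inl hx)
        · rcases List.mem_cons.mp hc with rfl | hc
          · exact Or.inl (Or.inr hx)
          · exact Or.inr ⟨c, hc, hq, hx⟩
    · rw [if_neg h, ih]
      constructor
      · rintro (hx | ⟨c, hc, hq, hx⟩)
        · exact Or.inl hx
        · exact Or.inr ⟨c, List.mem_cons_of_mem _ hc, hq, hx⟩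
      · rintro (hx | ⟨c, hc, hq, hx⟩)
        · exact Or.inl hx
        · rcases List.mem_cons.mp hc with rfl | hc
          · exact absurd hq h
          · exact Or.inr ⟨c, hc, hq, hx⟩

-- membership in B's outer fold (the position sweep)
theorem pv_mem_foldl_sweep {α β : Type} [BEq α] [LawfulBEq α]
    (is : List Int) (l : List β) (q : Int → β → Bool) (f : β → α)
    (acc : PySem.Set α) (x : α) :
    (x ∈ is.foldl (fun s i => l.foldl (fun s b => if q i b then PySem.Set.add s (f b) else s) s) acc) ↔
      x ∈ acc ∨ ∃ i ∈ is, ∃ b ∈ l, q i b = true ∧ x = f b := by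
  induction is generalizing acc with
  | nil => simp
  | cons i is ih =>
    simp only [List.foldl_cons]
    rw [ih]
    constructor
    · rintro (hx | ⟨j, hj, c, hc, hq, hx⟩)
      · rcases (pv_mem_foldl_addIf l (q i) f acc x).mp hx with hx | ⟨c, hc, hq, hx⟩
        · exact Or.inl hx
        · exact Or.inr ⟨i, List.mem_cons_self .., c, hc, hq, hx⟩
      · exact Or.inr ⟨j, List.mem_cons_of_mem _ hj, c, hc, hq, hx⟩
    · rintro (hx | ⟨j, hj, c, hc, hq, hx⟩)
      · exact Or.inl ((pv_mem_foldl_addIf l (q i) f acc x).mpr (Or.inl hx))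
      · rcases List.mem_cons.mp hj with rfl | hj
        · exact Or.inl ((pv_mem_foldl_addIf l (q j) f acc x).mpr (Or.inr ⟨c, hc, hq, hx⟩))
        · exact Or.inr ⟨j, hj, c, hc, hq, hx⟩

-- a pattern occurs at some position of the sweep iff it is a substring
theorem pv_sweep_pos_iff (s sub : List Char) :
    (∃ i ∈ PySem.List.pyRange 0 ((s.length : Int) + 1) 1,
        PySem.Chars.startswith (s.drop i.toNat) sub = true) ↔
      PySem.Chars.isIn sub s = true := by
  rw [← PySem.Chars.exists_prefix_drop_iff_isIn]
  constructor
  · rintro ⟨i, _, hs⟩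
    exact ⟨i.toNat, (PySem.Chars.startswith_iff _ _).mp hs⟩
  · rintro ⟨j, hj⟩
    by_cases hle : j ≤ s.length
    · refine ⟨(j : Int), ?_, (PySem.Chars.startswith_iff _ _).mpr (by simpa using hj)⟩
      rw [PySem.List.mem_pyRange_one]
      constructor <;> [exact Int.natCast_nonneg j; exact_mod_cast Nat.lt_succ_of_le hle]
    · have hnil : s.drop j = [] := List.drop_eq_nil_of_le (le_of_not_ge hle)
      rw [hnil] at hj
      have hsub : sub = [] := List.prefix_nil.mp hj
      refine ⟨0, ?_, (PySem.Chars.startswith_iff _ _).mpr (by simp [hsub])⟩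
      rw [PySem.List.mem_pyRange_one]
      omega

-- B's found-set contains exactly the titles whose lowered form is a substring
theorem pv_found_iff (tl : String) (x : String) :
    (x ∈ (PySem.List.pyRange 0 ((tl.toList.length : Int) + 1) 1).foldl
        (fun s i => (pvTitles.map (fun e => (PySem.Str.lower e, e))).foldl
          (fun s p =>
            if PySem.Chars.startswith (tl.toList.drop i.toNat) p.1.toList
            then PySem.Set.add s p.2 else s) s)
        PySem.Set.empty) ↔
      x ∈ pvTitles ∧ PySem.Str.isIn (PySem.Str.lower x) tl = true := by
  rw [pv_mem_foldl_sweep]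
  simp only [PySem.Set.empty, List.not_mem_nil, false_or, List.mem_map]
  constructor
  · rintro ⟨i, hi, p, ⟨e, he, hp⟩, hq, hx⟩
    subst hp
    simp only at hx
    subst hx
    refine ⟨he, ?_⟩
    rw [PySem.Str.isIn_iff_infix, ← PySem.Chars.isIn_iff_infix, PySem.Str.toList_lower]
    exact (pv_sweep_pos_iff tl.toList (PySem.Chars.lower (String.toList x))).mp
      ⟨i, hi, by simpa [PySem.Str.toList_lower] using hq⟩
  · rintro ⟨hx, hin⟩
    rw [PySem.Str.isIn_iff_infix, ← PySem.Chars.isIn_iff_infix, PySem.Str.toList_lower] at hin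
    rcases (pv_sweep_pos_iff tl.toList (PySem.Chars.lower (String.toList x))).mpr hin with ⟨i, hi, hs⟩
    exact ⟨i, hi, (PySem.Str.lower x, x), ⟨x, hx, rfl⟩, by simpa [PySem.Str.toList_lower] using hs, rfl⟩

-- ===== VERDICT (by name: the statement is the Claim_ definition above) =====
theorem combo_check_spec : Claim_equal_combo_check := by
  intro t _
  unfold Spec_combo_check combo_check combo_check_alt
  simp only [pvOuterA_eq, pvInnerA_eq]
  have hfilter :
      pvTitles.filter (fun e => PySem.Set.contains
        ((PySem.List.pyRange 0 (((PySem.Str.lower t).toList.length : Int) + 1) 1).foldl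
          (fun s i => (pvTitles.map (fun e => (PySem.Str.lower e, e))).foldl
            (fun s p =>
              if PySem.Chars.startswith ((PySem.Str.lower t).toList.drop i.toNat) p.1.toList
              then PySem.Set.add s p.2 else s) s)
          PySem.Set.empty) e) =
      pvTitles.filter (fun e => PySem.Str.isIn (PySem.Str.lower e) (PySem.Str.lower t)) := by
    apply List.filter_congr
    intro e he
    rw [Bool.eq_iff_iff, PySem.Set.contains, List.contains_iff_mem, pv_found_iff]
    exact ⟨fun h => h.2, fun h => ⟨he, h⟩⟩
  rw [hfilter]
  cases hm : pvTitles.filter (fun e => PySem.Str.isIn (PySem.Str.lower e) (PySem.Str.lower t)) with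
  | nil =>
    by_cases ha : (PySem.Str.split₀ (PySem.Str.lower t)).any (fun w => decide (w ∈ pvPeriodic)) <;>
      simp [ha]
  | cons e0 rest =>
    by_cases ha : (PySem.Str.split₀ (PySem.Str.lower t)).any (fun w => decide (w ∈ pvPeriodic)) <;>
      simp [ha]
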